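-- pv_equiv track=rewrite | github.com/jang010505/Problem-Solving-Study | programmers/level2/12923.py | f
-- ===== SOURCE A (Python) =====
-- def f(n):
--     if n == 1:
--         return 0
--
--     i = max(2, n//10000000)
--     while i*i <= n:
--         if n%i == 0 and n/i <= 10000000:
--             return n//i
--         i += 1
--
--     return 1
-- ===== SOURCE B (Python) =====
-- def f(n):
--     if n == 1:
--         return 0
--     j = min(10**7, n // 2)
--     while j >= 2 and j * j >= n:
--         if n % j == 0:
--             return j
--         j -= 1
--     return 1
-- ===== Notes on version B (the rewrite author's own statement) =====
-- stated objective: alternative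
-- what changed: B searches the answer (the larger complementary factor) directly, scanning j downward from min(ten million, n//2) while j*j >= n and returning the first divisor found, instead of A's ascending scan over the smaller factor i that returns n//i.
import Mathlib
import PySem

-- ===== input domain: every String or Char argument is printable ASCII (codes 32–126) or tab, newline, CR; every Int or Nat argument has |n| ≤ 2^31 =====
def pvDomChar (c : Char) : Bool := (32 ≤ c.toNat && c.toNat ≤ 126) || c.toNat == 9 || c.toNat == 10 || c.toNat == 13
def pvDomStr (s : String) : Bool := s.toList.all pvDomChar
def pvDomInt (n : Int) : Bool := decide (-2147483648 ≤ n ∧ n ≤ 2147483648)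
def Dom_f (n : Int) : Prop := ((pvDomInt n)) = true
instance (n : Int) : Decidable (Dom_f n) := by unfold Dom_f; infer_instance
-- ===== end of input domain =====

-- B scans the larger complementary factor downward and returns it directly, instead of
-- A's ascending scan over the smaller factor; alternative decomposition, no speed claim.
-- Python's float test 'n/i <= 10000000' is ported as the integer inequality n ≤ 10^7 * i,
-- which is exact for |n| ≤ 2^31 (the quotient is then far from the rounding granularity at 10^7).

-- ===== PORT A =====
-- the while loop of A: i ascends while i*i ≤ n
def pvLoopA (n i : Int) : Int :=
  if h : i * i ≤ n then
    if PySem.Int.mod n i = 0 ∧ n ≤ 10000000 * i then PySem.Int.floordiv n i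
    else pvLoopA n (i + 1)
  else 1
termination_by (n + 1 - i).toNat
decreasing_by
  have hi : i ≤ n := by rcases le_or_gt i 0 with h0 | h0 <;> nlinarith
  omega

def f (n : Int) : Int :=
  if n = 1 then 0
  else pvLoopA n (max 2 (PySem.Int.floordiv n 10000000))

-- ===== PORT B =====
-- the while loop of B: j descends while j ≥ 2 and j*j ≥ n
def pvLoopB (n j : Int) : Int :=
  if h : 2 ≤ j ∧ n ≤ j * j then
    if PySem.Int.mod n j = 0 then j
    else pvLoopB n (j - 1)
  else 1
termination_by (j - 1).toNat
decreasing_by omega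

def f_alt (n : Int) : Int :=
  if n = 1 then 0
  else pvLoopB n (min 10000000 (PySem.Int.floordiv n 2))

-- ===== PRECONDITION & SPEC =====
def Spec_f (n : Int) (out : Int) : Prop := out = f_alt n
instance (n : Int) (out : Int) : Decidable (Spec_f n out) := by unfold Spec_f; infer_instance

-- ===== CLAIM (what is proved, stated in full; the proofs are below) =====
def Claim_equal_f : Prop := ∀ (n : Int), Dom_f n → Spec_f n (f n)

-- ===== LEMMAS AND PROOFS =====

-- the predicate A's loop searches for (on the small factor k)
def pvQk (n k : Int) : Prop :=
  2 ≤ k ∧ k * k ≤ n ∧ n % k = 0 ∧ n ≤ 10000000 * k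

-- A's loop returns 1 when nothing from i on qualifies
theorem pvLoopA_none (n : Int) :
    ∀ i, 2 ≤ i → (∀ k, i ≤ k → k * k ≤ n → ¬ (n % k = 0 ∧ n ≤ 10000000 * k)) →
    pvLoopA n i = 1 := by
  intro i
  induction i using pvLoopA.induct n with
  | case1 i hle hcond =>
    intro h2 hnone
    rw [PySem.Int.mod_eq_emod_of_pos (by omega : (0:Int) < i)] at hcond
    exact absurd hcond (hnone i le_rfl hle)
  | case2 i hle hcond ih =>
    intro h2 hnone
    rw [pvLoopA, dif_pos hle, if_neg hcond]
    exact ih (by omega) (fun k hk => hnone k (by omega))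
  | case3 i hle =>
    intro _ _
    rw [pvLoopA, dif_neg hle]

-- A's loop returns n/k₀ when k₀ is the first qualifying index
theorem pvLoopA_found (n k₀ : Int) (hq : pvQk n k₀) :
    ∀ i, 2 ≤ i → i ≤ k₀ →
    (∀ k, i ≤ k → k < k₀ → ¬ (n % k = 0 ∧ n ≤ 10000000 * k)) →
    pvLoopA n i = n / k₀ := by
  obtain ⟨hk2, hksq, hkmod, hkbd⟩ := hq
  intro i
  induction i using pvLoopA.induct n with
  | case1 i hle hcond =>
    intro h2 hik hnone
    rw [PySem.Int.mod_eq_emod_of_pos (by omega : (0:Int) < i)] at hcond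
    rcases lt_or_eq_of_le hik with hlt | rfl
    · exact absurd hcond (hnone i le_rfl hlt)
    · rw [pvLoopA, dif_pos hle,
        if_pos (by rw [PySem.Int.mod_eq_emod_of_pos (by omega : (0:Int) < i)]; exact hcond)]
      exact PySem.Int.floordiv_eq_ediv_of_pos (by omega)
  | case2 i hle hcond ih =>
    intro h2 hik hnone
    rcases lt_or_eq_of_le hik with hlt | rfl
    · rw [pvLoopA, dif_pos hle, if_neg hcond]
      exact ih (by omega) (by omega) (fun k hk => hnone k (by omega))
    · rw [PySem.Int.mod_eq_emod_of_pos (by omega : (0:Int) < i)] at hcond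
      exact absurd ⟨hkmod, hkbd⟩ hcond
  | case3 i hle =>
    intro h2 hik hnone
    exact absurd (by nlinarith) hle

-- B's loop returns 1 when nothing from j down qualifies
theorem pvLoopB_none (n : Int) :
    ∀ j, (∀ j', 2 ≤ j' → j' ≤ j → ¬ (n ≤ j' * j' ∧ n % j' = 0)) →
    pvLoopB n j = 1 := by
  intro j
  induction j using pvLoopB.induct n with
  | case1 j hc hm =>
    intro hnone
    rw [PySem.Int.mod_eq_emod_of_pos (by omega : (0:Int) < j)] at hm
    exact absurd ⟨hc.2, hm⟩ (hnone j hc.1 le_rfl)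
  | case2 j hc hm ih =>
    intro hnone
    rw [pvLoopB, dif_pos hc, if_neg hm]
    exact ih (fun j' h2 hj' => hnone j' h2 (by omega))
  | case3 j hc =>
    intro _
    rw [pvLoopB, dif_neg hc]

-- B's loop returns j₀ when it is the first (largest) qualifying index below its start
theorem pvLoopB_found (n j₀ : Int) (h2 : 2 ≤ j₀) (hsq : n ≤ j₀ * j₀) (hmod : n % j₀ = 0) :
    ∀ j, j₀ ≤ j →
    (∀ j', j₀ < j' → j' ≤ j → ¬ (n ≤ j' * j' ∧ n % j' = 0)) →
    pvLoopB n j = j₀ := by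
  intro j
  induction j using pvLoopB.induct n with
  | case1 j hc hm =>
    intro hj hnone
    rcases lt_or_eq_of_le hj with hlt | rfl
    · rw [PySem.Int.mod_eq_emod_of_pos (by omega : (0:Int) < j)] at hm
      exact absurd ⟨hc.2, hm⟩ (hnone j hlt le_rfl)
    · rw [pvLoopB, dif_pos hc, if_pos hm]
  | case2 j hc hm ih =>
    intro hj hnone
    rcases lt_or_eq_of_le hj with hlt | rfl
    · rw [pvLoopB, dif_pos hc, if_neg hm]
      exact ih (by omega) (fun j' hj' hle => hnone j' hj' (by omega))
    · rw [PySem.Int.mod_eq_emod_of_pos (by omega : (0:Int) < j₀)] at hm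
      exact absurd hmod hm
  | case3 j hc =>
    intro hj hnone
    have h2j : 2 ≤ j := by omega
    have hsq' : n ≤ j * j := by nlinarith
    exact absurd ⟨h2j, hsq'⟩ hc

-- from a qualifying large factor j, the complementary small factor i = n / j qualifies
theorem pvSmall_of_large (n j : Int) (hn : 2 ≤ n) (h2 : 2 ≤ j)
    (hjsq : n ≤ j * j) (hjmod : n % j = 0) (hj7 : j ≤ 10000000) (hjhalf : j ≤ n / 2) :
    pvQk n (n / j) ∧ n / j * j = n := by
  have hdvd : j ∣ n := Int.dvd_of_emod_eq_zero hjmod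
  have hmul : n / j * j = n := Int.ediv_mul_cancel hdvd
  set i := n / j with hi
  have hipos : 0 < i := by
    rcases le_or_gt i 1 with h0 | h0
    · nlinarith
    · omega
  have h2i : 2 ≤ i := by
    have h2j : 2 * j ≤ n := by omega
    nlinarith
  have hij : i ≤ j := by nlinarith
  refine ⟨⟨h2i, by nlinarith, ?_, by nlinarith⟩, hmul⟩
  exact Int.emod_eq_zero_of_dvd ⟨j, by linarith⟩

-- main bridge for n ≥ 2
theorem pvMain (n : Int) (hn : 2 ≤ n) :
    pvLoopA n (max 2 (PySem.Int.floordiv n 10000000)) =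
    pvLoopB n (min 10000000 (PySem.Int.floordiv n 2)) := by
  rw [PySem.Int.floordiv_eq_ediv_of_pos (by norm_num : (0:Int) < 10000000),
      PySem.Int.floordiv_eq_ediv_of_pos (by norm_num : (0:Int) < 2)]
  by_cases hex : ∃ k, pvQk n k
  · -- take the least qualifying small factor k₀
    obtain ⟨k₀, hk₀, hleast⟩ :=
      Int.exists_least_of_bdd (P := fun k => pvQk n k) ⟨2, fun z hz => hz.1⟩ hex
    obtain ⟨hk2, hksq, hkmod, hkbd⟩ := hk₀
    have hdvd : k₀ ∣ n := Int.dvd_of_emod_eq_zero hkmod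
    set j₀ := n / k₀ with hj₀
    have hmul : j₀ * k₀ = n := Int.ediv_mul_cancel hdvd
    have hjpos : 0 < j₀ := by
      rcases le_or_gt j₀ 0 with h0 | h0
      · nlinarith
      · exact h0
    have hkj : k₀ ≤ j₀ := by nlinarith
    have hj2 : 2 ≤ j₀ := by omega
    have hjsq : n ≤ j₀ * j₀ := by nlinarith
    have hj7 : j₀ ≤ 10000000 := by nlinarith
    have hjmod : n % j₀ = 0 := Int.emod_eq_zero_of_dvd ⟨k₀, hmul.symm⟩
    have hjhalf : j₀ ≤ n / 2 := by
      have : 2 * j₀ ≤ n := by nlinarith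
      omega
    have hstart : max 2 (n / 10000000) ≤ k₀ := by
      have : n / 10000000 ≤ k₀ := by omega
      omega
    have hA : pvLoopA n (max 2 (n / 10000000)) = n / k₀ := by
      refine pvLoopA_found n k₀ ⟨hk2, hksq, hkmod, hkbd⟩ _ (le_max_left _ _) hstart ?_
      rintro k hk hklt ⟨hm, hb⟩
      have h2k : 2 ≤ k := le_trans (le_max_left _ _) hk
      have hksq' : k * k ≤ n := by nlinarith
      exact absurd (hleast k ⟨h2k, hksq', hm, hb⟩) (by omega)
    have hB : pvLoopB n (min 10000000 (n / 2)) = j₀ := by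
      refine pvLoopB_found n j₀ hj2 hjsq hjmod _ (by omega) ?_
      rintro j' hj' hle ⟨hsq', hm'⟩
      have h2j' : 2 ≤ j' := by omega
      obtain ⟨hq, hmul'⟩ := pvSmall_of_large n j' hn h2j' hsq' hm' (by omega) (by omega)
      have hik : k₀ ≤ n / j' := hleast _ hq
      nlinarith
    rw [hA, hB]
  · -- no qualifying small factor: both loops return 1
    rw [not_exists] at hex
    have hA : pvLoopA n (max 2 (n / 10000000)) = 1 := by
      refine pvLoopA_none n _ (le_max_left _ _) ?_
      rintro k hk hsq ⟨hm, hb⟩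
      exact hex k ⟨le_trans (le_max_left _ _) hk, hsq, hm, hb⟩
    have hB : pvLoopB n (min 10000000 (n / 2)) = 1 := by
      refine pvLoopB_none n _ ?_
      rintro j' h2 hle ⟨hsq', hm'⟩
      have hle2 : j' ≤ n / 2 := le_trans hle (min_le_right _ _)
      have hle7 : j' ≤ 10000000 := le_trans hle (min_le_left _ _)
      obtain ⟨hq, _⟩ := pvSmall_of_large n j' hn h2 hsq' hm' hle7 hle2
      exact hex _ hq
    rw [hA, hB]

-- nonpositive n (and n = 0): both loops exit at once
theorem pvSmall_n (n : Int) (hn : n ≤ 1) (hne : n ≠ 1) : f n = f_alt n := by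
  have hn0 : n ≤ 0 := by omega
  rw [f, f_alt, if_neg hne, if_neg hne]
  rw [PySem.Int.floordiv_eq_ediv_of_pos (by norm_num : (0:Int) < 10000000),
      PySem.Int.floordiv_eq_ediv_of_pos (by norm_num : (0:Int) < 2)]
  have hA : pvLoopA n (max 2 (n / 10000000)) = 1 := by
    have hst : 2 ≤ max 2 (n / 10000000) := le_max_left _ _
    rw [pvLoopA, dif_neg (by nlinarith)]
  have hB : pvLoopB n (min 10000000 (n / 2)) = 1 := by
    have hle : n / 2 ≤ 0 := by omega
    rw [pvLoopB, dif_neg ?_]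
    rintro ⟨h2, _⟩
    have := min_le_right (10000000 : Int) (n / 2)
    omega
  rw [hA, hB]

-- ===== VERDICT (by name: the statement is the Claim_ definition above) =====
theorem f_spec : Claim_equal_f := by
  intro n _
  unfold Spec_f
  rcases le_or_gt n 1 with h1 | h1
  · rcases eq_or_ne n 1 with rfl | hne
    · rw [f, f_alt]; norm_num
    · exact pvSmall_n n h1 hne
  · rw [f, f_alt, if_neg (by omega), if_neg (by omega)]
    exact pvMain n (by omega)
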